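-- pv_equiv track=rewrite | github.com/stackwalnuts/walnut | plugins/alive/scripts/relay-probe.py | _parse_repo_url
-- ===== SOURCE A (Python) =====
-- def _parse_repo_url(url):
--     # type: (str) -> Optional[tuple]
--     """Parse a GitHub repo URL into ``(owner, repo)`` tuple.
--
--     Accepts the canonical forms ``https://github.com/<owner>/<repo>`` and
--     ``https://github.com/<owner>/<repo>.git`` (trailing ``.git`` stripped).
--     Returns ``None`` if the URL is empty or unparseable -- the probe records
--     that as ``reachable: false`` with an actionable error string.
--     """
--     if not url or not isinstance(url, str):
--         return None
--     # Trim whitespace + trailing slash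
--     u = url.strip().rstrip("/")
--     # Strip github.com/ prefix variants
--     for prefix in (
--         "https://github.com/",
--         "http://github.com/",
--         "git@github.com:",
--         "github.com/",
--     ):
--         if u.startswith(prefix):
--             u = u[len(prefix):]
--             break
--     else:
--         return None
--     if u.endswith(".git"):
--         u = u[:-4]
--     parts = u.split("/")
--     if len(parts) != 2 or not parts[0] or not parts[1]:
--         return None
--     return (parts[0], parts[1])
-- ===== SOURCE B (Python) =====
-- def _parse_repo_url(url):
--     if not url or not isinstance(url, str):
--         return None
--     u = url.strip().rstrip("/")
--     if u.startswith("git@github.com:"):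
--         segs = ["github.com"] + u[len("git@github.com:"):].split("/")
--     else:
--         segs = u.split("/")
--         if segs[:3] in (["https:", "", "github.com"], ["http:", "", "github.com"]):
--             segs = segs[2:]
--     if len(segs) != 3 or segs[0] != "github.com":
--         return None
--     owner, repo = segs[1], segs[2]
--     if repo.endswith(".git"):
--         repo = repo[:-4]
--     if owner and repo:
--         return (owner, repo)
--     return None
-- ===== Notes on version B (the rewrite author's own statement) =====
-- stated objective: alternative
-- what changed: B replaces A's try-each-prefix loop followed by a two-part split with a single split of the whole URL on '/' and pattern-matching of the segments against ["github.com", owner, repo] (shifting off the scheme segments for "https://github.com/x/y"-style inputs and rewriting the "git@github.com:psf/requests.git" form), stripping ".git" from the repo segment afterwards.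
import Mathlib
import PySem

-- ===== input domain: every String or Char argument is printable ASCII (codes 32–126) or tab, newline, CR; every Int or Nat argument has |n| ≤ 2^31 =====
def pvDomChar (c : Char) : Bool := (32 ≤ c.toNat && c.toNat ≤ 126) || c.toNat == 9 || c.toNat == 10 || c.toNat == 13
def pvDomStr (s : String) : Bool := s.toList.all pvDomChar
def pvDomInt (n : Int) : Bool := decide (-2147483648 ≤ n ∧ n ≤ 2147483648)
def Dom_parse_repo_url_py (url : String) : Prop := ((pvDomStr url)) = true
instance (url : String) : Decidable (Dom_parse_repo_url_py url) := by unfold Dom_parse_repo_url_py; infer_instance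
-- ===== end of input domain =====

-- B re-groups the URL by splitting the whole normalized URL on '/' once and pattern-matching the segments
-- against ["github.com", owner, repo] (alternative decomposition, same cost as A's prefix loop + split).

-- shared builtin: Python's  s.rstrip("/")  (hand-ported; exact: removes trailing '/' characters)
def pvRstripSlash (cs : List Char) : List Char := (cs.reverse.dropWhile (· == '/')).reverse

-- ===== PORT A =====
-- the shared ".git"-suffix strip both Pythons perform:  u[:-4] if u.endswith(".git") else u
def pvStripGit (u : List Char) : List Char :=
  if PySem.Chars.endswith u ".git".toList then PySem.List.slice u none (some (-4)) else u

-- the for/else prefix loop: first matching prefix is stripped (u[len(prefix):]), else None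
def pvAStrip : List (List Char) → List Char → Option (List Char)
  | [], _ => none
  | p :: ps, u =>
    if PySem.Chars.startswith u p then some (PySem.List.slice u (some (p.length : Int)) none)
    else pvAStrip ps u

-- after the loop: require exactly two nonempty parts
-- (parts[0]/parts[1] are read only under len(parts) == 2, hence getD is exact)
def pvAParts (parts : List (List Char)) : Option (String × String) :=
  if parts.length ≠ 2 ∨ parts.getD 0 [] = [] ∨ parts.getD 1 [] = [] then none
  else some (String.ofList (parts.getD 0 []), String.ofList (parts.getD 1 []))

def pvAFinish (u1 : List Char) : Option (String × String) :=
  pvAParts (PySem.Chars.splitOn (pvStripGit u1) "/".toList)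

def pvACore (u : List Char) : Option (String × String) :=
  match pvAStrip ["https://github.com/".toList, "http://github.com/".toList,
                  "git@github.com:".toList, "github.com/".toList] u with
  | none => none
  | some u1 => pvAFinish u1

def parse_repo_url_py (url : String) : Option (String × String) :=
  if url = "" then none  -- 'not url' (isinstance is always true for a String argument)
  else pvACore (pvRstripSlash (PySem.Chars.strip url.toList))

-- ===== PORT B =====
-- B's tail: segments must be exactly ["github.com", owner, repo]; ".git" stripped from repo
def pvBFinish (segs : List (List Char)) : Option (String × String) :=
  if segs.length ≠ 3 ∨ segs.getD 0 [] ≠ "github.com".toList then none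
  else if segs.getD 1 [] ≠ [] ∧ pvStripGit (segs.getD 2 []) ≠ [] then
    some (String.ofList (segs.getD 1 []), String.ofList (pvStripGit (segs.getD 2 [])))
  else none

def pvBCore (u : List Char) : Option (String × String) :=
  pvBFinish
    (if PySem.Chars.startswith u "git@github.com:".toList then
      "github.com".toList ::
        PySem.Chars.splitOn (PySem.List.slice u (some ("git@github.com:".toList.length : Int)) none) "/".toList
    else if PySem.List.slice (PySem.Chars.splitOn u "/".toList) none (some 3) = ["https:".toList, "".toList, "github.com".toList] ∨
            PySem.List.slice (PySem.Chars.splitOn u "/".toList) none (some 3) = ["http:".toList, "".toList, "github.com".toList] then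
      PySem.List.slice (PySem.Chars.splitOn u "/".toList) (some 2) none
    else PySem.Chars.splitOn u "/".toList)

def parse_repo_url_py_alt (url : String) : Option (String × String) :=
  if url = "" then none
  else pvBCore (pvRstripSlash (PySem.Chars.strip url.toList))

-- ===== PRECONDITION & SPEC =====
def Spec_parse_repo_url_py (url : String) (out : Option (String × String)) : Prop := out = parse_repo_url_py_alt url
instance (url : String) (out : Option (String × String)) : Decidable (Spec_parse_repo_url_py url out) := by unfold Spec_parse_repo_url_py; infer_instance

-- ===== CLAIM (what is proved, stated in full; the proofs are below) =====
def Claim_equal_parse_repo_url_py : Prop := ∀ (url : String), Dom_parse_repo_url_py url → Spec_parse_repo_url_py url (parse_repo_url_py url)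

-- ===== LEMMAS AND PROOFS =====

-- PySem.Chars.splitOn with a one-character separator is Mathlib's List.splitOn
lemma splitOn_go_eq (c : Char) : ∀ (fuel : Nat) (l cur : List Char) (acc : List (List Char)), l.length ≤ fuel →
    PySem.Chars.splitOn.go [c] fuel l cur acc = acc.reverse ++ (List.splitOn c l).modifyHead (cur.reverse ++ ·) := by
  intro fuel
  induction fuel with
  | zero =>
    intro l cur acc h
    have : l = [] := by cases l <;> simp_all
    subst this
    simp [PySem.Chars.splitOn.go, List.splitOn]
  | succ n ih =>
    intro l cur acc h
    cases l with
    | nil => simp [PySem.Chars.splitOn.go, List.splitOn]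
    | cons x rest =>
      by_cases hx : x = c
      · subst hx
        have hp : List.isPrefixOf [x] (x :: rest) = true := by simp [List.isPrefixOf]
        rw [PySem.Chars.splitOn.go]
        simp only [hp, if_pos]
        rw [ih _ _ _ (by simpa using Nat.le_of_succ_le_succ h)]
        simp [List.splitOn, List.splitOnP_cons]
        cases hs : List.splitOnP (fun y => y == x) rest <;> simp
      · have hp : List.isPrefixOf [c] (x :: rest) = false := by
          simp [List.isPrefixOf]
          intro hxc; exact absurd hxc.symm hx
        rw [PySem.Chars.splitOn.go]
        simp only [hp]
        rw [ih rest (x :: cur) acc (by simpa using Nat.le_of_succ_le_succ h)]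
        have := List.splitOnP_ne_nil (fun y => y == c) rest
        cases hs : List.splitOnP (fun y => y == c) rest with
        | nil => exact absurd hs this
        | cons a t => simp [List.splitOn, List.splitOnP_cons, hx, hs]

lemma chars_splitOn_eq (s : List Char) (c : Char) :
    PySem.Chars.splitOn s [c] = List.splitOn c s := by
  rw [PySem.Chars.splitOn, splitOn_go_eq c _ _ _ _ (by omega)]
  cases h : List.splitOn c s <;> simp

-- splitting o ++ c :: r where o is separator-free
lemma splitOn_sep_cons (c : Char) (o r : List Char) (h : c ∉ o) :
    List.splitOn c (o ++ c :: r) = o :: List.splitOn c r := by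
  unfold List.splitOn
  exact List.splitOnP_first _ o (by intro x hx; simp; rintro rfl; exact h hx) c (by simp) r

lemma splitOn_nosep (c : Char) (o : List Char) (h : c ∉ o) : List.splitOn c o = [o] := by
  unfold List.splitOn
  exact List.splitOnP_eq_single _ o (by intro x hx; simp; rintro rfl; exact h hx)

-- inversion: the shape of the input from the shape of the split
lemma splitOn_inv (c : Char) : ∀ (u s : List Char) (t : List (List Char)), List.splitOn c u = s :: t →
    c ∉ s ∧ ((t = [] ∧ u = s) ∨ ∃ r, u = s ++ c :: r ∧ List.splitOn c r = t) := by
  intro u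
  induction u with
  | nil =>
    intro s t h
    simp [List.splitOn, List.splitOnP_nil] at h
    obtain ⟨rfl, rfl⟩ := h
    exact ⟨by simp, Or.inl ⟨rfl, rfl⟩⟩
  | cons x u' ih =>
    intro s t h
    by_cases hx : x = c
    · subst hx
      simp [List.splitOn, List.splitOnP_cons] at h
      obtain ⟨rfl, ht⟩ := h
      refine ⟨by simp, Or.inr ⟨u', by simp, ?_⟩⟩
      simpa [List.splitOn] using ht
    · have hne := List.splitOnP_ne_nil (fun y => y == c) u'
      cases hs : List.splitOnP (fun y => y == c) u' with
      | nil => exact absurd hs hne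
      | cons a t' =>
        simp [List.splitOn, List.splitOnP_cons, hx, hs] at h
        obtain ⟨rfl, rfl⟩ := h
        obtain ⟨hca, hshape⟩ := ih a t' (by simpa [List.splitOn] using hs)
        refine ⟨by simp [hca]; exact fun hc => hx hc.symm, ?_⟩
        rcases hshape with ⟨rfl, rfl⟩ | ⟨r, rfl, hr⟩
        · exact Or.inl ⟨rfl, rfl⟩
        · exact Or.inr ⟨r, by simp, hr⟩

-- appending a separator-free suffix does not change the number of pieces
lemma splitOn_append_nosep_length (c : Char) (s : List Char) (hs : c ∉ s) :
    ∀ r : List Char, (List.splitOn c (r ++ s)).length = (List.splitOn c r).length := by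
  intro r
  induction r with
  | nil =>
    have := splitOn_nosep c s hs
    simp only [List.nil_append, this]
    simp [List.splitOn, List.splitOnP_nil]
  | cons x r' ih =>
    by_cases hx : x = c
    · subst hx; simp [List.splitOn, List.splitOnP_cons] at ih ⊢; omega
    · simp [List.splitOn, List.splitOnP_cons, hx] at ih ⊢
      simp [ih]

lemma nosep_of_append_left {c : Char} {a b : List Char} (h : c ∉ a ++ b) : c ∉ a :=
  fun hm => h (List.mem_append_left _ hm)

-- pvStripGit computed on a list ending in ".git"
lemma stripGit_append (x : List Char) : pvStripGit (x ++ ".git".toList) = x := by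
  unfold pvStripGit
  rw [(PySem.Chars.endswith_iff _ _).mpr ⟨x, rfl⟩, if_pos rfl,
      PySem.List.slice_to_neg_ofNat _ 4 (by norm_num)]
  have h : (x ++ ".git".toList).length - 4 = x.length := by simp
  rw [h]; exact List.take_left' rfl

-- pvStripGit is the identity when ".git" is not a suffix
lemma stripGit_of_not_suffix (x : List Char) (h : ¬ ".git".toList <:+ x) : pvStripGit x = x := by
  unfold pvStripGit
  rw [Bool.eq_false_iff.mpr (fun hc => h ((PySem.Chars.endswith_iff _ _).mp hc))]
  simp

-- a string ends in ".git" iff its final '/'-free piece does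
lemma gitsuffix_shift (o rp : List Char) (h : ¬ ".git".toList <:+ rp) :
    ¬ ".git".toList <:+ o ++ '/' :: rp := by
  intro hc
  have hsl2 : ('/' :: rp) <:+ o ++ '/' :: rp := ⟨o, rfl⟩
  rcases List.suffix_or_suffix_of_suffix hc hsl2 with h2 | h2
  · rcases List.suffix_cons_iff.mp h2 with h3 | h3
    · have : ('/' : Char) ∈ ".git".toList := h3 ▸ List.mem_cons_self
      exact absurd this (by decide)
    · exact h h3
  · have : ('/' : Char) ∈ ".git".toList := h2.subset List.mem_cons_self
    exact absurd this (by decide)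

-- the two tails agree: A's strip-.git-then-split equals B's split-then-strip-.git
lemma fin_eq (r : List Char) :
    pvAFinish r = pvBFinish ("github.com".toList :: PySem.Chars.splitOn r "/".toList) := by
  have hsl : "/".toList = ['/'] := rfl
  rw [hsl, chars_splitOn_eq r '/']
  by_cases hlen : (List.splitOn '/' r).length = 2
  · -- exactly two pieces: r = o ++ '/' :: rp with '/' ∉ o, '/' ∉ rp
    obtain ⟨o, rp, hss⟩ : ∃ o rp, List.splitOn '/' r = [o, rp] := by
      cases h1 : List.splitOn '/' r with
      | nil => exact absurd h1 (by unfold List.splitOn; exact List.splitOnP_ne_nil _ _)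
      | cons a t => cases t with
        | nil => simp [h1] at hlen
        | cons b t2 => cases t2 with
          | nil => exact ⟨a, b, rfl⟩
          | cons d t3 => simp [h1] at hlen
    obtain ⟨ho, hshape⟩ := splitOn_inv '/' r o [rp] hss
    rcases hshape with ⟨h, -⟩ | ⟨r1, rfl, hr1⟩
    · exact absurd h (by simp)
    obtain ⟨hrp, hshape2⟩ := splitOn_inv '/' r1 rp [] hr1
    rcases hshape2 with ⟨-, rfl⟩ | ⟨r2, -, hr2⟩
    swap
    · exact absurd hr2 (by unfold List.splitOn; exact List.splitOnP_ne_nil _ _)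
    rw [hss]
    have hB : pvBFinish ["github.com".toList, o, r1] =
        if o ≠ [] ∧ pvStripGit r1 ≠ [] then
          some (String.ofList o, String.ofList (pvStripGit r1)) else none := by
      unfold pvBFinish
      simp
    rw [hB]
    by_cases hgit : ".git".toList <:+ r1
    · obtain ⟨rp0, rfl⟩ : ∃ rp0, r1 = rp0 ++ ".git".toList := by
        obtain ⟨rp0, h0⟩ := hgit; exact ⟨rp0, h0.symm⟩
      have hrp0 : ('/' : Char) ∉ rp0 := nosep_of_append_left hrp
      have hA : pvStripGit (o ++ '/' :: (rp0 ++ ".git".toList)) = o ++ '/' :: rp0 := by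
        have := stripGit_append (o ++ '/' :: rp0)
        simpa using this
      unfold pvAFinish
      rw [hA, stripGit_append rp0, hsl, chars_splitOn_eq _ '/',
          splitOn_sep_cons '/' o rp0 ho, splitOn_nosep '/' rp0 hrp0]
      unfold pvAParts
      by_cases ho0 : o = [] <;> by_cases hrp00 : rp0 = [] <;> simp [ho0, hrp00]
    · have hA : pvStripGit (o ++ '/' :: r1) = o ++ '/' :: r1 :=
        stripGit_of_not_suffix _ (gitsuffix_shift o r1 hgit)
      unfold pvAFinish
      rw [hA, stripGit_of_not_suffix r1 hgit, hsl, chars_splitOn_eq _ '/',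
          splitOn_sep_cons '/' o r1 ho, splitOn_nosep '/' r1 hrp]
      unfold pvAParts
      by_cases ho0 : o = [] <;> by_cases hrp0 : r1 = [] <;> simp [ho0, hrp0]
  · -- piece count ≠ 2: both sides are none
    have hB : pvBFinish ("github.com".toList :: List.splitOn '/' r) = none := by
      unfold pvBFinish
      simp
      intro h2
      exact absurd h2 hlen
    rw [hB]
    unfold pvAFinish
    by_cases hgit : ".git".toList <:+ r
    · obtain ⟨r0, rfl⟩ : ∃ r0, r = r0 ++ ".git".toList := by
        obtain ⟨r0, h0⟩ := hgit; exact ⟨r0, h0.symm⟩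
      rw [stripGit_append r0, hsl, chars_splitOn_eq _ '/']
      have hl0 : (List.splitOn '/' r0).length ≠ 2 := by
        rw [← splitOn_append_nosep_length '/' ".git".toList (by decide) r0]; exact hlen
      unfold pvAParts
      simp [hl0]
    · rw [stripGit_of_not_suffix r hgit, hsl, chars_splitOn_eq _ '/']
      unfold pvAParts
      simp [hlen]

-- Bool forms of startswith
lemma sw_true {u p : List Char} (h : p <+: u) : PySem.Chars.startswith u p = true :=
  (PySem.Chars.startswith_iff u p).mpr h
lemma sw_false {u p : List Char} (h : ¬ p <+: u) : PySem.Chars.startswith u p = false :=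
  Bool.eq_false_iff.mpr (fun hc => h ((PySem.Chars.startswith_iff u p).mp hc))

lemma not_prefix_of_prefix {p q u : List Char} (h : q <+: u) (h1 : ¬ p <+: q) (h2 : ¬ q <+: p) :
    ¬ p <+: u := fun hp => (List.prefix_or_prefix_of_prefix hp h).elim h1 h2

-- fin_eq with the split already in Mathlib form
lemma fin_eq' (r : List Char) :
    pvAFinish r = pvBFinish ("github.com".toList :: List.splitOn '/' r) := by
  have := fin_eq r
  rwa [show "/".toList = ['/'] from rfl, chars_splitOn_eq] at this

-- the cores agree on every string
lemma core_eq (u : List Char) : pvACore u = pvBCore u := by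
  have hsl : "/".toList = ['/'] := rfl
  by_cases h1 : "https://github.com/".toList <+: u
  · obtain ⟨r, rfl⟩ := h1
    have hpre := List.prefix_append "https://github.com/".toList r
    have hA : pvACore ("https://github.com/".toList ++ r) = pvAFinish r := by
      simp [pvACore, pvAStrip, PySem.Chars.startswith, List.isPrefixOf, PySem.List.slice, PySem.List.clampIdx]
    have hgit : ¬ "git@github.com:".toList <+: "https://github.com/".toList ++ r :=
      not_prefix_of_prefix hpre (by decide) (by decide)
    have hsplit : PySem.Chars.splitOn ("https://github.com/".toList ++ r) "/".toList =
        "https:".toList :: "".toList :: "github.com".toList :: List.splitOn '/' r := by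
      rw [hsl, chars_splitOn_eq,
          show "https://github.com/".toList ++ r =
            "https:".toList ++ '/' :: ("".toList ++ '/' :: ("github.com".toList ++ '/' :: r)) from rfl,
          splitOn_sep_cons '/' _ _ (by decide), splitOn_sep_cons '/' _ _ (by decide),
          splitOn_sep_cons '/' _ _ (by decide)]
    rw [hA]
    unfold pvBCore
    rw [sw_false hgit, hsplit]
    simp only [PySem.List.slice_to _ (by norm_num : (0:Int) ≤ 3), PySem.List.slice_from _ (by norm_num : (0:Int) ≤ 2)]
    simpa using fin_eq' r
  · by_cases h2 : "http://github.com/".toList <+: u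
    · obtain ⟨r, rfl⟩ := h2
      have hpre := List.prefix_append "http://github.com/".toList r
      have hA : pvACore ("http://github.com/".toList ++ r) = pvAFinish r := by
        simp [pvACore, pvAStrip, PySem.Chars.startswith, List.isPrefixOf, PySem.List.slice, PySem.List.clampIdx]
      have hgit : ¬ "git@github.com:".toList <+: "http://github.com/".toList ++ r :=
        not_prefix_of_prefix hpre (by decide) (by decide)
      have hsplit : PySem.Chars.splitOn ("http://github.com/".toList ++ r) "/".toList =
          "http:".toList :: "".toList :: "github.com".toList :: List.splitOn '/' r := by
        rw [hsl, chars_splitOn_eq,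
            show "http://github.com/".toList ++ r =
              "http:".toList ++ '/' :: ("".toList ++ '/' :: ("github.com".toList ++ '/' :: r)) from rfl,
            splitOn_sep_cons '/' _ _ (by decide), splitOn_sep_cons '/' _ _ (by decide),
            splitOn_sep_cons '/' _ _ (by decide)]
      rw [hA]
      unfold pvBCore
      rw [sw_false hgit, hsplit]
      simp only [PySem.List.slice_to _ (by norm_num : (0:Int) ≤ 3), PySem.List.slice_from _ (by norm_num : (0:Int) ≤ 2)]
      simpa using fin_eq' r
    · by_cases h3 : "git@github.com:".toList <+: u
      · obtain ⟨r, rfl⟩ := h3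
        have hpre := List.prefix_append "git@github.com:".toList r
        have hA : pvACore ("git@github.com:".toList ++ r) = pvAFinish r := by
          simp [pvACore, pvAStrip, PySem.Chars.startswith, List.isPrefixOf, PySem.List.slice, PySem.List.clampIdx]
        rw [hA]
        unfold pvBCore
        rw [sw_true hpre, PySem.List.slice_from_natCast, List.drop_left, hsl, chars_splitOn_eq]
        exact fin_eq' r
      · by_cases h4 : "github.com/".toList <+: u
        · obtain ⟨r, rfl⟩ := h4
          have hpre := List.prefix_append "github.com/".toList r
          have hA : pvACore ("github.com/".toList ++ r) = pvAFinish r := by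
            simp [pvACore, pvAStrip, PySem.Chars.startswith, List.isPrefixOf, PySem.List.slice, PySem.List.clampIdx]
          have hgit : ¬ "git@github.com:".toList <+: "github.com/".toList ++ r :=
            not_prefix_of_prefix hpre (by decide) (by decide)
          have hsplit : PySem.Chars.splitOn ("github.com/".toList ++ r) "/".toList =
              "github.com".toList :: List.splitOn '/' r := by
            rw [hsl, chars_splitOn_eq,
                show "github.com/".toList ++ r = "github.com".toList ++ '/' :: r from rfl,
                splitOn_sep_cons '/' _ _ (by decide)]
          rw [hA]
          unfold pvBCore
          rw [sw_false hgit, hsplit]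
          simp only [PySem.List.slice_to _ (by norm_num : (0:Int) ≤ 3)]
          simpa using fin_eq' r
        · -- no recognized prefix: A is none, and B finds no ["github.com", _, _] shape either
          have hA : pvACore u = none := by
            simp only [pvACore, pvAStrip]
            rw [sw_false h1, sw_false h2, sw_false h3, sw_false h4]
            simp
          rw [hA]
          unfold pvBCore
          rw [sw_false h3, hsl, chars_splitOn_eq u '/']
          simp only [Bool.false_eq_true, if_false,
                     PySem.List.slice_to (List.splitOn '/' u) (by norm_num : (0:Int) ≤ 3),
                     PySem.List.slice_from (List.splitOn '/' u) (by norm_num : (0:Int) ≤ 2),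
                     show Int.toNat 3 = 3 from rfl, show Int.toNat 2 = 2 from rfl]
          by_cases hc : List.take 3 (List.splitOn '/' u) = ["https:".toList, "".toList, "github.com".toList] ∨
              List.take 3 (List.splitOn '/' u) = ["http:".toList, "".toList, "github.com".toList]
          · -- the shift fired although A rejected: the tail after github.com must be empty
            have key : ∀ pfx hd, List.take 3 (List.splitOn '/' u) = [hd, [], "github.com".toList] →
                hd ++ '/' :: ('/' :: ("github.com".toList ++ '/' :: [])) = pfx →
                (¬ ∃ r, u = pfx ++ r) →
                List.drop 2 (List.splitOn '/' u) = ["github.com".toList] := by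
              intro pfx hd htake hpfx hnp
              have hu : List.splitOn '/' u = hd :: [] :: "github.com".toList :: List.drop 3 (List.splitOn '/' u) := by
                conv_lhs => rw [← List.take_append_drop 3 (List.splitOn '/' u)]
                rw [htake]; rfl
              obtain ⟨-, hs1⟩ := splitOn_inv '/' u hd _ hu
              rcases hs1 with ⟨h, -⟩ | ⟨r1, huu, hr1⟩
              · exact absurd h (by simp)
              obtain ⟨-, hs2⟩ := splitOn_inv '/' r1 [] _ hr1
              rcases hs2 with ⟨h, -⟩ | ⟨r2, hru, hr2⟩
              · exact absurd h (by simp)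
              obtain ⟨-, hs3⟩ := splitOn_inv '/' r2 "github.com".toList _ hr2
              rcases hs3 with ⟨ht, -⟩ | ⟨r3, hrv, -⟩
              · rw [hu, ht]; rfl
              · exact absurd ⟨r3, by rw [huu, hru, hrv, ← hpfx]; simp⟩ hnp
            rcases hc with hc | hc
            · have hdrop := key "https://github.com/".toList "https:".toList hc rfl
                (by rintro ⟨r, rfl⟩; exact h1 (List.prefix_append _ _))
              rw [if_pos (Or.inl hc), hdrop]
              simp [pvBFinish]
            · have hdrop := key "http://github.com/".toList "http:".toList hc rfl
                (by rintro ⟨r, rfl⟩; exact h2 (List.prefix_append _ _))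
              rw [if_pos (Or.inr hc), hdrop]
              simp [pvBFinish]
          · rw [if_neg hc]
            -- no shift: first segment would have to be "github.com", forcing the github.com/ prefix
            cases hs : List.splitOn '/' u with
            | nil => exact absurd hs (by unfold List.splitOn; exact List.splitOnP_ne_nil _ _)
            | cons s t =>
              have hcond : (s :: t).length ≠ 3 ∨ (s :: t).getD 0 [] ≠ "github.com".toList := by
                by_cases hlen3 : (s :: t).length = 3
                · right
                  intro hsg
                  have hsgh : s = "github.com".toList := by simpa [List.getD] using hsg
                  obtain ⟨-, hs1⟩ := splitOn_inv '/' u s t hs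
                  rcases hs1 with ⟨rfl, -⟩ | ⟨r1, huu, -⟩
                  · simp at hlen3
                  · exact h4 ⟨r1, by rw [huu, hsgh]; rfl⟩
                · exact Or.inl hlen3
              unfold pvBFinish
              rw [if_pos hcond]

-- ===== VERDICT (by name: the statement is the Claim_ definition above) =====
theorem parse_repo_url_py_spec : Claim_equal_parse_repo_url_py := by
  intro url _
  unfold Spec_parse_repo_url_py parse_repo_url_py parse_repo_url_py_alt
  by_cases h : url = "" <;> simp [h, core_eq]
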